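-- pv_equiv track=rewrite | github.com/posl/comment_recommendation | script/mod_gen/3_time/en/149_D/9.py | RPS_Battle
-- ===== SOURCE A (Python) =====
-- def RPS_Battle(N,K,R,S,P,T):
--     #N: number of rounds
--     #K: number of rounds that cannot be used the same hand
--     #R: point for winning with Rock
--     #S: point for winning with Scissors
--     #P: point for winning with Paper
--     #T: string of hands that the machine will play in each round
--     #return: maximum total score earned in the game
--
--     score = 0
--     for i in range(N):
--         if i < K:
--             if T[i] == 'r':
--                 score += P
--             elif T[i] == 's':
--                 score += R
--             else:
--                 score += S
--         else:
--             if T[i-K] == T[i]: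
--                 T = T[:i] + 'x' + T[i+1:]
--             else:
--                 if T[i] == 'r':
--                     score += P
--                 elif T[i] == 's':
--                     score += R
--                 else:
--                     score += S
--     return score
-- ===== SOURCE B (Python) =====
-- def RPS_Battle(N, K, R, S, P, T):
--     # Per residue class mod K: gather the hands, split into maximal runs of
--     # equal hands, and score ceil(run/2) wins per run.
--     total = 0
--     for r in range(min(K, N)):
--         cs = []
--         i = r
--         while i < N:
--             cs.append(T[i])
--             i += K
--         j = 0
--         while j < len(cs):
--             L = 1
--             while j + L < len(cs) and cs[j + L] == cs[j]:
--                 L += 1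
--             if cs[j] == 'r':
--                 w = P
--             elif cs[j] == 's':
--                 w = R
--             else:
--                 w = S
--             total += (L + 1) // 2 * w
--             j += L
--     return total
-- ===== Notes on version B (the rewrite author's own statement) =====
-- stated objective: simpler
-- what changed: A walks all rounds in one pass, repeatedly rebuilding the string T with an 'x' marker on every skipped round; B never mutates anything: it splits the rounds into residue classes mod K, cuts each class into maximal runs of equal hands, and adds ceil(L/2) wins per run.
-- outside the precondition, e.g. on RPS_Battle(2, -1, 1, 2, 3, 'rsp'): A returns 4, B returns 0; on RPS_Battle(4, 1, 1, 2, 3, 'aaxx'): A returns 2, B returns 4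
import Mathlib
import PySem

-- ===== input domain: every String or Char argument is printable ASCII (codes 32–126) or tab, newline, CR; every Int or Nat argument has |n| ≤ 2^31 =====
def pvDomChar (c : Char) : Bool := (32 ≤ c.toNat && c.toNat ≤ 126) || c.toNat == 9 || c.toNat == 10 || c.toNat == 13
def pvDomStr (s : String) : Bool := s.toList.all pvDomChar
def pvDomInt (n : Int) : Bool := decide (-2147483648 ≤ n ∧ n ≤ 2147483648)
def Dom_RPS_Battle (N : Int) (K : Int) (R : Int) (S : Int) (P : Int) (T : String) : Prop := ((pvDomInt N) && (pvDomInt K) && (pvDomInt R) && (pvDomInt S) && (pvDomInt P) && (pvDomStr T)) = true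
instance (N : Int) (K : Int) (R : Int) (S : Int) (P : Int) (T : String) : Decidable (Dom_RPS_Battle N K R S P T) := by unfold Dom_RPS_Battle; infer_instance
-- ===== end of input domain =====

-- B re-implements A's greedy marking pass as an independent per-residue-class run scan
-- (score ceil(L/2) wins per maximal run); objective: simpler — no string mutation, no marking.
-- A rebuilds the string T on every skipped round (Python strings are immutable); B never does.

-- ===== PORT A =====

-- the r/s/else → P/R/S score table (the if/elif/else chain both Pythons contain)
def winHand (R S P : Int) (c : Char) : Int :=
  if c = 'r' then P else if c = 's' then R else S

-- one iteration of A's `for i in range(N)` loop; state = (score, T).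
-- `T[i]` is PySem.Str.pyGet?; `.getD 'x'` is unreachable under Pre_ (indices in range).
def stepA (K R S P : Int) (st : Int × String) (i : Int) : Int × String :=
  if i < K then
    (st.1 + winHand R S P ((PySem.Str.pyGet? st.2 i).getD 'x'), st.2)
  else
    if (PySem.Str.pyGet? st.2 (i - K)).getD 'x' = (PySem.Str.pyGet? st.2 i).getD 'x' then
      (st.1, PySem.Str.slice st.2 none (some i) ++ "x" ++ PySem.Str.slice st.2 (some (i + 1)) none)
    else
      (st.1 + winHand R S P ((PySem.Str.pyGet? st.2 i).getD 'x'), st.2)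

def RPS_Battle (N : Int) (K : Int) (R : Int) (S : Int) (P : Int) (T : String) : Int :=
  ((PySem.List.pyRange 0 N 1).foldl (stepA K R S P) (0, T)).1

-- ===== PORT B =====

-- `cs = []; i = r; while i < N: cs.append(T[i]); i += K` — the chars of residue class r.
-- (the `0 < K` conjunct only makes the recursion well-founded; B's loop runs only for K ≥ 1)
def colAux (N K : Int) (T : String) (i : Int) : List Char :=
  if _h : i < N ∧ 0 < K then
    (PySem.Str.pyGet? T i).getD 'x' :: colAux N K T (i + K)
  else []
  termination_by (N - i).toNat
  decreasing_by omega

-- leading-run splitter: the inner `while j + L < len(cs) and cs[j+L] == cs[j]: L += 1`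
-- (count of further equal chars, and the remaining suffix)
def runSplit (c : Char) : List Char → Nat × List Char
  | [] => (0, [])
  | d :: ds => if d = c then ((runSplit c ds).1 + 1, (runSplit c ds).2) else (0, d :: ds)

theorem runSplit_len_le (c : Char) : ∀ l : List Char, (runSplit c l).2.length ≤ l.length := by
  intro l; induction l with
  | nil => simp [runSplit]
  | cons d ds ih => by_cases h : d = c <;> simp [runSplit, h] <;> omega

-- the outer `while j < len(cs)` loop: score (L+1)//2 wins per maximal run
def scanRuns (R S P : Int) : List Char → Int
  | [] => 0
  | c :: cs =>
    PySem.Int.floordiv (((runSplit c cs).1 : Int) + 1 + 1) 2 * winHand R S P c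
      + scanRuns R S P (runSplit c cs).2
  termination_by l => l.length
  decreasing_by
    have := runSplit_len_le c cs
    simp; omega

def RPS_Battle_alt (N : Int) (K : Int) (R : Int) (S : Int) (P : Int) (T : String) : Int :=
  (PySem.List.pyRange 0 (min K N) 1).foldl
    (fun total r => total + scanRuns R S P (colAux N K T r)) 0

-- ===== PRECONDITION & SPEC =====
-- For 0 < N, Pre_ excludes: N > len(T), where A raises IndexError; K < 0, outside the
-- natural no-repeat domain (A then compares each round with a LATER one, and may raise);
-- and strings whose first N hands contain the literal character 'x', which A uses as its
-- in-place marker, so A conflates a real 'x' hand with a marked (skipped) one.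
def Pre_RPS_Battle (N : Int) (K : Int) (R : Int) (S : Int) (P : Int) (T : String) : Prop :=
  N ≤ 0 ∨ (N ≤ PySem.Str.len T ∧ 0 ≤ K ∧ 'x' ∉ T.toList.take N.toNat)
instance (N : Int) (K : Int) (R : Int) (S : Int) (P : Int) (T : String) : Decidable (Pre_RPS_Battle N K R S P T) := by unfold Pre_RPS_Battle; infer_instance

def pvWitness_RPS_Battle : Int × Int × Int × Int × Int × String := (6, 2, 3, 4, 5, "rrsspr")

def Spec_RPS_Battle (N : Int) (K : Int) (R : Int) (S : Int) (P : Int) (T : String) (out : Int) : Prop := out = RPS_Battle_alt N K R S P T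
instance (N : Int) (K : Int) (R : Int) (S : Int) (P : Int) (T : String) (out : Int) : Decidable (Spec_RPS_Battle N K R S P T out) := by unfold Spec_RPS_Battle; infer_instance

-- ===== CLAIM (what is proved, stated in full; the proofs are below) =====
def Claim_equal_RPS_Battle : Prop := ∀ (N : Int) (K : Int) (R : Int) (S : Int) (P : Int) (T : String), Dom_RPS_Battle N K R S P T → Pre_RPS_Battle N K R S P T → Spec_RPS_Battle N K R S P T (RPS_Battle N K R S P T)

-- ===== LEMMAS AND PROOFS =====

-- ---- the effective character left at index j by A's marking pass ----
def eff (t : List Char) (k : Nat) (j : Nat) : Char :=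
  if h : 0 < k ∧ k ≤ j then
    (if eff t k (j - k) = t.getD j 'x' then 'x' else t.getD j 'x')
  else t.getD j 'x'
  termination_by j
  decreasing_by omega

-- the score A collects at round j
def scoreAt (t : List Char) (k : Nat) (R S P : Int) (j : Nat) : Int :=
  if k ≤ j ∧ eff t k (j - k) = t.getD j 'x' then 0 else winHand R S P (t.getD j 'x')

-- string contents after m rounds of A's loop
def effList (t : List Char) (k : Nat) (m : Nat) : List Char :=
  (List.range t.length).map (fun j => if j < m then eff t k j else t.getD j 'x')

-- chars of residue class i (front recursion, Nat world)
def chainF (t : List Char) (k n : Nat) (i : Nat) : List Char :=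
  if h : i < n ∧ 0 < k then t.getD i 'x' :: chainF t k n (i + k) else []
  termination_by (n - i)
  decreasing_by omega

-- A's score along residue class i (front recursion)
def sumAlongN (t : List Char) (k : Nat) (R S P : Int) (n : Nat) (i : Nat) : Int :=
  if h : i < n ∧ 0 < k then scoreAt t k R S P i + sumAlongN t k R S P n (i + k) else 0
  termination_by (n - i)
  decreasing_by omega

-- reference greedy with explicit carried state (score so far added on the right)
def greedyS (R S P : Int) (q : Option Char) : List Char → Int × Option Char
  | [] => (0, q)
  | c :: cs =>
    if some c = q then greedyS R S P none cs
    else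
      let rec' := greedyS R S P (some c) cs
      (winHand R S P c + rec'.1, rec'.2)

theorem eff_of_lt (t : List Char) (k j : Nat) (h : j < k) : eff t k j = t.getD j 'x' := by
  rw [eff]; simp; omega

theorem eff_cases (t : List Char) (k j : Nat) : eff t k j = 'x' ∨ eff t k j = t.getD j 'x' := by
  rw [eff]; split
  · split <;> simp
  · simp

theorem runSplit_spec (c : Char) : ∀ l : List Char,
    l = List.replicate (runSplit c l).1 c ++ (runSplit c l).2 ∧ (runSplit c l).2.head? ≠ some c := by
  intro l; induction l with
  | nil => simp [runSplit]
  | cons d ds ih =>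
    by_cases h : d = c
    · subst h
      simp only [runSplit, if_pos rfl]
      refine ⟨?_, ih.2⟩
      conv_lhs => rw [ih.1]
      simp [List.replicate_succ]
    · simp [runSplit, h]

theorem greedyS_skip (R S P : Int) (c : Char) (l : List Char) (h : l.head? ≠ some c) :
    (greedyS R S P (some c) l).1 = (greedyS R S P none l).1 := by
  cases l with
  | nil => simp [greedyS]
  | cons d ds =>
    simp at h
    simp [greedyS, h]

theorem greedyS_run (R S P : Int) (c : Char) : ∀ (m : Nat) (l : List Char), l.head? ≠ some c →
    (greedyS R S P none (c :: (List.replicate m c ++ l))).1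
      = (((m + 2) / 2 : Nat) : Int) * winHand R S P c + (greedyS R S P none l).1 := by
  intro m
  induction m using Nat.strong_induction_on with
  | _ m IH =>
    intro l hl
    match m with
    | 0 =>
      simp [greedyS, greedyS_skip R S P c l hl]
    | 1 =>
      simp [List.replicate_succ, greedyS]
    | (m + 2) =>
      have h2 : (greedyS R S P none (c :: (List.replicate m c ++ l))).1
          = (((m + 2) / 2 : Nat) : Int) * winHand R S P c + (greedyS R S P none l).1 :=
        IH m (by omega) l hl
      simp [List.replicate_succ, greedyS] at h2 ⊢
      push_cast [Nat.add_div_right] at h2 ⊢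
      linarith [h2]

theorem scan_eq_aux (R S P : Int) : ∀ (n : Nat) (l : List Char), l.length = n → scanRuns R S P l = (greedyS R S P none l).1 := by
  intro n
  induction n using Nat.strong_induction_on with
  | _ n IH =>
  intro l hn
  match l with
  | [] => simp [scanRuns, greedyS]
  | c :: cs =>
    obtain ⟨hsplit, hhead⟩ := runSplit_spec c cs
    rw [scanRuns]
    have hlen : (runSplit c cs).2.length ≤ cs.length := by
      conv_rhs => rw [hsplit]
      simp
    rw [IH (runSplit c cs).2.length (by subst hn; simp; omega) _ rfl]
    conv_rhs => rw [hsplit]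
    rw [greedyS_run R S P c _ _ hhead]
    have hfd : PySem.Int.floordiv (((runSplit c cs).1 : Int) + 1 + 1) 2 = ((((runSplit c cs).1 + 2) / 2 : Nat) : Int) := by
      rw [PySem.Int.floordiv_eq_ediv_of_pos (by omega)]
      omega
    rw [hfd]

theorem scan_eq (R S P : Int) (l : List Char) : scanRuns R S P l = (greedyS R S P none l).1 :=
  scan_eq_aux R S P l.length l rfl

-- the greedy state entering index i of its residue class
def prevState (t : List Char) (k : Nat) (i : Nat) : Option Char :=
  if k ≤ i then (if eff t k (i - k) = 'x' then none else some (t.getD (i - k) 'x')) else none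

theorem chainScore (t : List Char) (k : Nat) (R S P : Int) (n : Nat) (hk : 0 < k)
    (hn : n ≤ t.length) (hx : ∀ j, j < n → t.getD j 'x' ≠ 'x') :
    ∀ (fuel : Nat) (i : Nat), n - i ≤ fuel →
      (greedyS R S P (prevState t k i) (chainF t k n i)).1 = sumAlongN t k R S P n i := by
  intro fuel
  induction fuel with
  | zero =>
    intro i hi
    have h1 : ¬ (i < n ∧ 0 < k) := by omega
    rw [chainF, dif_neg h1, sumAlongN, dif_neg h1]
    simp [greedyS]
  | succ fuel IH =>
    intro i hi
    by_cases h1 : i < n ∧ 0 < k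
    · rw [chainF, dif_pos h1, sumAlongN, dif_pos h1]
      have hxi : t.getD i 'x' ≠ 'x' := hx i h1.1
      by_cases hskip : some (t.getD i 'x') = prevState t k i
      · -- A skipped round i: eff i = 'x'
        have hki : k ≤ i := by
          by_contra hlt
          simp [prevState, if_neg hlt] at hskip
        have heq : eff t k (i - k) = t.getD i 'x' := by
          rcases eff_cases t k (i - k) with h | h
          · exfalso
            simp [prevState, if_pos hki, h] at hskip
          · rw [prevState, if_pos hki, if_neg (by rw [h]; exact hx (i - k) (by omega))] at hskip
            rw [h]
            exact (Option.some.injEq _ _ ▸ hskip :).symm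
        have heffi : eff t k i = 'x' := by
          rw [eff, dif_pos ⟨hk, hki⟩, if_pos heq]
        have hscore : scoreAt t k R S P i = 0 := by
          simp [scoreAt, if_pos, hki, heq]
        have hprev : prevState t k (i + k) = none := by
          simp [prevState, Nat.add_sub_cancel, heffi]
        rw [greedyS, if_pos hskip, hscore]
        rw [← hprev, IH (i + k) (by omega)]
        ring
      · -- A scores round i: eff i = t[i]
        have heffi : eff t k i = t.getD i 'x' := by
          rw [eff]
          split
          · rename_i hcond
            rw [if_neg]
            intro heq
            apply hskip
            rw [prevState, if_pos hcond.2]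
            rcases eff_cases t k (i - k) with h | h
            · rw [h] at heq
              exact absurd heq.symm hxi
            · rw [if_neg (by rw [h]; exact hx (i - k) (by omega))]
              rw [← h, heq]
          · rfl
        have hscore : scoreAt t k R S P i = winHand R S P (t.getD i 'x') := by
          rw [scoreAt, if_neg]
          rintro ⟨hki, heq⟩
          apply hskip
          rw [prevState, if_pos hki]
          rcases eff_cases t k (i - k) with h | h
          · rw [h] at heq; exact absurd heq.symm hxi
          · rw [if_neg (by rw [h]; exact hx (i - k) (by omega))]
            rw [← h, heq]
        have hprev : prevState t k (i + k) = some (t.getD i 'x') := by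
          rw [prevState, if_pos (by omega : k ≤ i + k), Nat.add_sub_cancel, heffi, if_neg hxi]
        rw [greedyS, if_neg hskip, hscore]
        simp only []
        rw [← hprev, IH (i + k) (by omega)]
    · rw [chainF, dif_neg h1, sumAlongN, dif_neg h1]
      simp [greedyS]

theorem sumAlongN_succ (t : List Char) (k : Nat) (R S P : Int) (n : Nat) (hk : 0 < k) :
    ∀ (fuel : Nat) (i : Nat), n + 1 - i ≤ fuel →
      sumAlongN t k R S P (n + 1) i
        = sumAlongN t k R S P n i + (if i ≤ n ∧ (n - i) % k = 0 then scoreAt t k R S P n else 0) := by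
  intro fuel
  induction fuel with
  | zero =>
    intro i hi
    have hA : sumAlongN t k R S P (n + 1) i = 0 := by rw [sumAlongN, dif_neg (by omega)]
    have hB : sumAlongN t k R S P n i = 0 := by rw [sumAlongN, dif_neg (by omega)]
    rw [hA, hB, if_neg (by omega)]
    ring
  | succ fuel IH =>
    intro i hi
    by_cases h1 : i < n
    · have hcond : (i + k ≤ n ∧ (n - (i + k)) % k = 0) ↔ (i ≤ n ∧ (n - i) % k = 0) := by
        constructor
        · rintro ⟨h2, h3⟩
          refine ⟨by omega, ?_⟩
          have : n - i = (n - (i + k)) + k := by omega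
          rw [this, Nat.add_mod_right]
          exact h3
        · rintro ⟨h2, h3⟩
          rcases Nat.dvd_of_mod_eq_zero h3 with ⟨q, hq⟩
          match q with
          | 0 => omega
          | q + 1 =>
            have hmul : k * (q + 1) = k * q + k := by ring
            rw [hmul] at hq
            refine ⟨by omega, ?_⟩
            have hrw : n - (i + k) = k * q := by omega
            rw [hrw]
            simp [Nat.mul_mod_right]
      have hA : sumAlongN t k R S P (n + 1) i
          = scoreAt t k R S P i + sumAlongN t k R S P (n + 1) (i + k) := by
        rw [sumAlongN, dif_pos ⟨by omega, hk⟩]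
      have hB : sumAlongN t k R S P n i
          = scoreAt t k R S P i + sumAlongN t k R S P n (i + k) := by
        rw [sumAlongN, dif_pos ⟨h1, hk⟩]
      rw [hA, hB, IH (i + k) (by omega), if_congr hcond rfl rfl]
      ring
    · by_cases h2 : i = n
      · subst h2
        have hA : sumAlongN t k R S P (i + 1) i
            = scoreAt t k R S P i + sumAlongN t k R S P (i + 1) (i + k) := by
          rw [sumAlongN, dif_pos ⟨by omega, hk⟩]
        have hA2 : sumAlongN t k R S P (i + 1) (i + k) = 0 := by
          rw [sumAlongN, dif_neg (by omega)]
        have hB : sumAlongN t k R S P i i = 0 := by rw [sumAlongN, dif_neg (by omega)]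
        rw [hA, hA2, hB, if_pos ⟨le_refl _, by simp⟩]
        ring
      · have hA : sumAlongN t k R S P (n + 1) i = 0 := by rw [sumAlongN, dif_neg (by omega)]
        have hB : sumAlongN t k R S P n i = 0 := by rw [sumAlongN, dif_neg (by omega)]
        rw [hA, hB, if_neg (by omega)]
        ring

theorem residue_unique (k n r : Nat) (hk : 0 < k) (hr : r < k) :
    (r ≤ n ∧ (n - r) % k = 0) ↔ r = n % k := by
  constructor
  · rintro ⟨h1, h2⟩
    rcases Nat.dvd_of_mod_eq_zero h2 with ⟨q, hq⟩
    have : n = r + k * q := by omega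
    rw [this, Nat.add_mul_mod_self_left, Nat.mod_eq_of_lt hr]
  · intro h
    subst h
    refine ⟨Nat.mod_le n k, ?_⟩
    conv_lhs => rw [← Nat.div_add_mod n k]
    simp [Nat.add_sub_cancel, Nat.mul_mod_right]

theorem partition (t : List Char) (k : Nat) (R S P : Int) (hk : 0 < k) :
    ∀ n : Nat, ∑ j ∈ Finset.range n, scoreAt t k R S P j
      = ∑ r ∈ Finset.range (min k n), sumAlongN t k R S P n r := by
  intro n
  induction n with
  | zero => simp
  | succ n ih =>
    rw [Finset.sum_range_succ, ih]
    have hsucc : ∀ r, sumAlongN t k R S P (n + 1) r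
        = sumAlongN t k R S P n r + (if r ≤ n ∧ (n - r) % k = 0 then scoreAt t k R S P n else 0) :=
      fun r => sumAlongN_succ t k R S P n hk (n + 1) r (by omega)
    by_cases hkn : k ≤ n
    · have hmin1 : min k (n + 1) = k := by omega
      have hmin0 : min k n = k := by omega
      rw [hmin1, hmin0]
      rw [Finset.sum_congr rfl (fun r hr => hsucc r)]
      rw [Finset.sum_add_distrib]
      congr 1
      rw [Finset.sum_congr rfl (fun r hr => by
        rw [if_congr (residue_unique k n r hk (Finset.mem_range.mp hr)) rfl rfl])]
      rw [Finset.sum_ite_eq_of_mem' _ _ _ (Finset.mem_range.mpr (Nat.mod_lt n hk))]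
    · have hmin1 : min k (n + 1) = n + 1 := by omega
      have hmin0 : min k n = n := by omega
      rw [hmin1, hmin0]
      rw [Finset.sum_range_succ]
      rw [Finset.sum_congr rfl (fun r hr => hsucc r)]
      rw [Finset.sum_add_distrib]
      rw [hsucc n]
      have hB : sumAlongN t k R S P n n = 0 := by rw [sumAlongN, dif_neg (by omega)]
      rw [hB, if_pos ⟨le_refl _, by simp⟩]
      have hz : ∀ r ∈ Finset.range n, (if r ≤ n ∧ (n - r) % k = 0 then scoreAt t k R S P n else 0) = 0 := by
        intro r hr
        rw [if_neg]
        rintro ⟨h1, h2⟩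
        have hrk := Finset.mem_range.mp hr
        have hlt : n - r < k := by omega
        rw [Nat.mod_eq_of_lt hlt] at h2
        omega
      rw [Finset.sum_congr rfl hz]
      simp

theorem length_effList (t : List Char) (k m : Nat) : (effList t k m).length = t.length := by
  simp [effList]

theorem getElem?_effList (t : List Char) (k m j : Nat) (hj : j < t.length) :
    (effList t k m)[j]? = some (if j < m then eff t k j else t.getD j 'x') := by
  simp [effList, List.getElem?_map, List.getElem?_range hj]

theorem effList_zero (t : List Char) (k : Nat) : effList t k 0 = t := by
  apply List.ext_getElem?
  intro j
  by_cases hj : j < t.length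
  · rw [getElem?_effList t k 0 j hj]
    simp [List.getD_eq_getElem?_getD, List.getElem?_eq_getElem hj]
  · rw [List.getElem?_eq_none (show (effList t k 0).length ≤ j by rw [length_effList]; omega),
        List.getElem?_eq_none (by omega)]

theorem effList_succ_set (t : List Char) (k m : Nat) (hm : m < t.length) :
    effList t k (m + 1) = (effList t k m).set m (eff t k m) := by
  apply List.ext_getElem?
  intro j
  by_cases hj : j < t.length
  · rw [getElem?_effList t k (m+1) j hj, List.getElem?_set]
    by_cases hjm : m = j
    · subst hjm
      simp [length_effList, hj]
    · rw [if_neg hjm, getElem?_effList t k m j hj]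
      congr 1
      by_cases hlt : j < m
      · rw [if_pos (by omega), if_pos hlt]
      · rw [if_neg (by omega), if_neg hlt]
  · rw [List.getElem?_eq_none (show (effList t k (m+1)).length ≤ j by rw [length_effList]; omega),
        List.getElem?_eq_none (show ((effList t k m).set m (eff t k m)).length ≤ j by rw [List.length_set, length_effList]; omega)]

theorem effList_succ_noskip (t : List Char) (k m : Nat) (hm : m < t.length)
    (heq : eff t k m = t.getD m 'x') : effList t k (m + 1) = effList t k m := by
  rw [effList_succ_set t k m hm]
  apply List.ext_getElem?
  intro j
  rw [List.getElem?_set]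
  by_cases hjm : m = j
  · subst hjm
    rw [if_pos rfl, if_pos (by rw [length_effList]; omega), getElem?_effList t k m m hm]
    rw [heq]
    simp
  · rw [if_neg hjm]

theorem Ainv (K R S P : Int) (T : String) (hK : 1 ≤ K) (n : Nat) (hn : n ≤ T.toList.length) :
    ∀ m : Nat, m ≤ n →
      ((PySem.List.pyRange 0 ((m : Nat) : Int) 1).foldl (stepA K R S P) (0, T)).1
          = ∑ j ∈ Finset.range m, scoreAt T.toList K.toNat R S P j
        ∧ ((PySem.List.pyRange 0 ((m : Nat) : Int) 1).foldl (stepA K R S P) (0, T)).2.toList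
          = effList T.toList K.toNat m := by
  set t := T.toList with ht
  set k := K.toNat with hk
  have hKk : (k : Int) = K := Int.toNat_of_nonneg (by omega)
  intro m
  induction m with
  | zero =>
    intro _
    rw [show ((0 : Nat) : Int) = 0 by rfl, PySem.List.pyRange_one_eq_nil (le_refl 0)]
    simpa using (effList_zero t k).symm
  | succ m ih =>
    intro hm1
    obtain ⟨ih1, ih2⟩ := ih (by omega)
    have hmlen : m < t.length := by omega
    have hcast : ((m + 1 : Nat) : Int) = ((m : Nat) : Int) + 1 := by push_cast; ring
    rw [hcast, PySem.List.pyRange_one_succ_right (by positivity), List.foldl_append,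
        List.foldl_cons, List.foldl_nil]
    set st := (PySem.List.pyRange 0 ((m : Nat) : Int) 1).foldl (stepA K R S P) (0, T) with hst
    have hget_i : (PySem.Str.pyGet? st.2 ((m : Nat) : Int)).getD 'x' = t.getD m 'x' := by
      rw [PySem.Str.pyGet?_natCast, ih2, getElem?_effList t k m m hmlen,
          if_neg (lt_irrefl m), Option.getD_some]
    have hsum : ∑ j ∈ Finset.range (m + 1), scoreAt t k R S P j
        = (∑ j ∈ Finset.range m, scoreAt t k R S P j) + scoreAt t k R S P m :=
      Finset.sum_range_succ _ _
    by_cases hmk : m < k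
    · -- i < K branch
      have heffm : eff t k m = t.getD m 'x' := eff_of_lt t k m hmk
      rw [stepA, if_pos (by omega)]
      constructor
      · rw [hget_i, ih1, hsum, scoreAt, if_neg (by omega)]
      · rw [ih2, effList_succ_noskip t k m hmlen heffm]
    · -- i ≥ K
      have hsub : ((m : Nat) : Int) - K = ((m - k : Nat) : Int) := by
        push_cast
        omega
      have hprevlen : m - k < t.length := by omega
      have hget_prev : (PySem.Str.pyGet? st.2 (((m : Nat) : Int) - K)).getD 'x'
          = eff t k (m - k) := by
        rw [hsub, PySem.Str.pyGet?_natCast, ih2, getElem?_effList t k m (m - k) hprevlen,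
            if_pos (by omega), Option.getD_some]
      rw [stepA, if_neg (by omega)]
      by_cases hskip : eff t k (m - k) = t.getD m 'x'
      · rw [if_pos (by rw [hget_prev, hget_i]; exact hskip)]
        constructor
        · rw [ih1, hsum, scoreAt, if_pos ⟨by omega, hskip⟩]
          ring
        · have heffm : eff t k m = 'x' := by
            rw [eff, dif_pos ⟨by omega, by omega⟩, if_pos hskip]
          rw [String.toList_append, String.toList_append,
              PySem.Str.toList_slice, PySem.Str.toList_slice]
          show PySem.List.slice st.2.toList none (some ((m : Nat) : Int)) ++ "x".toList
              ++ PySem.List.slice st.2.toList (some (((m : Nat) : Int) + 1)) none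
            = effList t k (m + 1)
          rw [PySem.List.slice_to_natCast, show (((m : Nat) : Int) + 1) = ((m + 1 : Nat) : Int) by push_cast; ring,
              PySem.List.slice_from_natCast, ih2]
          rw [effList_succ_set t k m hmlen, heffm,
              List.set_eq_take_cons_drop _ (by rw [length_effList]; omega)]
          simp
      · rw [if_neg (by rw [hget_prev, hget_i]; exact hskip)]
        have heffm : eff t k m = t.getD m 'x' := by
          rw [eff, dif_pos ⟨by omega, by omega⟩, if_neg hskip]
        constructor
        · rw [hget_i, ih1, hsum, scoreAt, if_neg (by rintro ⟨_, h⟩; exact hskip h)]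
        · rw [ih2, effList_succ_noskip t k m hmlen heffm]

theorem xfree_of_pre (t : List Char) (n : Nat) (hn : n ≤ t.length) (hx : 'x' ∉ t.take n) :
    ∀ j, j < n → t.getD j 'x' ≠ 'x' := by
  intro j hj heq
  apply hx
  rw [← heq, List.getD_eq_getElem?_getD, List.getElem?_eq_getElem (by omega), Option.getD_some]
  rw [show t[j] = (t.take n)[j]'(by simp; omega) from (List.getElem_take ..).symm]
  exact List.getElem_mem _

theorem colAux_eq (N K : Int) (T : String) (hN : 0 ≤ N) (hK : 1 ≤ K) :
    ∀ (fuel : Nat) (i : Nat), N.toNat - i ≤ fuel →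
      colAux N K T ((i : Nat) : Int) = chainF T.toList K.toNat N.toNat i := by
  intro fuel
  induction fuel with
  | zero =>
    intro i hi
    rw [colAux, dif_neg (by omega), chainF, dif_neg (by omega)]
  | succ fuel IH =>
    intro i hi
    by_cases h1 : i < N.toNat
    · rw [colAux, dif_pos ⟨by omega, by omega⟩, chainF, dif_pos ⟨h1, by omega⟩]
      rw [show ((i : Nat) : Int) + K = ((i + K.toNat : Nat) : Int) by push_cast; omega]
      rw [IH (i + K.toNat) (by omega)]
      congr 1
      rw [PySem.Str.pyGet?_natCast, List.getD_eq_getElem?_getD]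
    · rw [colAux, dif_neg (by omega), chainF, dif_neg (by omega)]

theorem foldB_sum (g : Int → Int) : ∀ M : Nat,
    (PySem.List.pyRange 0 ((M : Nat) : Int) 1).foldl (fun acc r => acc + g r) 0
      = ∑ j ∈ Finset.range M, g ((j : Nat) : Int) := by
  intro M
  induction M with
  | zero => rw [show ((0 : Nat) : Int) = 0 by rfl, PySem.List.pyRange_one_eq_nil (le_refl 0)]; simp
  | succ M IH =>
    rw [show ((M + 1 : Nat) : Int) = ((M : Nat) : Int) + 1 by push_cast; ring,
        PySem.List.pyRange_one_succ_right (by positivity), List.foldl_append,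
        List.foldl_cons, List.foldl_nil, IH, Finset.sum_range_succ]


theorem A_zero_of_nonpos (N K R S P : Int) (T : String) (hN : N ≤ 0) :
    RPS_Battle N K R S P T = 0 := by
  rw [RPS_Battle, PySem.List.pyRange_one_eq_nil (by omega)]
  rfl

theorem B_zero_of_min_nonpos (N K R S P : Int) (T : String) (hm : min K N ≤ 0) :
    RPS_Battle_alt N K R S P T = 0 := by
  rw [RPS_Battle_alt, PySem.List.pyRange_one_eq_nil (by omega)]
  rfl

theorem A_zero_of_K_zero (R S P : Int) :
    ∀ (l : List Int) (s : Int) (str : String), (∀ i ∈ l, 0 ≤ i) →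
      (l.foldl (stepA 0 R S P) (s, str)).1 = s := by
  intro l
  induction l with
  | nil => intro s str _; rfl
  | cons i is ih =>
    intro s str h
    have h0 : ¬ (i < 0) := by have := h i (by simp); omega
    rw [List.foldl_cons, stepA, if_neg h0, if_pos (by rw [sub_zero])]
    exact ih _ _ (fun j hj => h j (by simp [hj]))

-- ===== VERDICT (by name: the statement is the Claim_ definition above) =====
theorem RPS_Battle_spec : Claim_equal_RPS_Battle := by
  unfold Claim_equal_RPS_Battle
  intro N K R S P T _ hpre
  unfold Spec_RPS_Battle
  by_cases hN0 : N ≤ 0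
  · rw [A_zero_of_nonpos N K R S P T hN0,
        B_zero_of_min_nonpos N K R S P T (le_trans (min_le_right K N) hN0)]
  · rcases hpre with h | ⟨hNlen, hK0, hx⟩
    · omega
    rw [PySem.Str.len_eq] at hNlen
    by_cases hK : 1 ≤ K
    · set t := T.toList with ht
      set k := K.toNat with hk
      set n := N.toNat with hn
      have hkpos : 0 < k := by omega
      have hnlen : n ≤ t.length := by omega
      have hxf : ∀ j, j < n → t.getD j 'x' ≠ 'x' :=
        xfree_of_pre t n hnlen (by rwa [hn] at hx)
      have hNc : N = ((n : Nat) : Int) := by omega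
      have hA : RPS_Battle N K R S P T = ∑ j ∈ Finset.range n, scoreAt t k R S P j := by
        rw [RPS_Battle, hNc]
        exact (Ainv K R S P T hK n hnlen n (le_refl n)).1
      have hmin : min K N = ((min k n : Nat) : Int) := by
        push_cast; omega
      have hB : RPS_Battle_alt N K R S P T
          = ∑ j ∈ Finset.range (min k n), scanRuns R S P (colAux N K T ((j : Nat) : Int)) := by
        rw [RPS_Battle_alt, hmin, foldB_sum]
      rw [hA, hB, partition t k R S P hkpos n]
      apply Finset.sum_congr rfl
      intro r hr
      have hrk : r < k := by
        have := Finset.mem_range.mp hr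
        omega
      rw [colAux_eq N K T (by omega) hK n r (by omega), scan_eq]
      have hprev : prevState t k r = none := by
        rw [prevState, if_neg (by omega)]
      rw [← hprev, ← hn, ← hk, ← ht]
      exact (chainScore t k R S P n hkpos hnlen hxf n r (by omega)).symm
    · -- K = 0: A skips every round (T[i-0] == T[i] always), B sums over an empty range
      have hKz : K = 0 := by omega
      subst hKz
      rw [RPS_Battle, A_zero_of_K_zero R S P _ 0 T
            (fun i hi => (PySem.List.mem_pyRange_one.mp hi).1),
          B_zero_of_min_nonpos N 0 R S P T (min_le_left 0 N)]
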